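-- pv_equiv track=rewrite | github.com/lahavlipson/Triple_Classifier | TripleClassifier.py | isLineValid
-- ===== SOURCE A (Python) =====
-- def isLineValid(line):
--     arr = line.rstrip().split(' ')
--     if arr[2][0:2] == 'op' or arr[2][0:4] == 'name':
--         return False
--     alphabet = list("abcdefghijklmnopqrstuvwxyz")
--     for letter in alphabet:
--         if ("-" + letter) in line:
--             return False
--     return True
-- ===== SOURCE B (Python) =====
-- _LOWER = "abcdefghijklmnopqrstuvwxyz"
--
--
-- def isLineValid(line):
--     arr = line.rstrip().split(' ')
--     if arr[2][0:2] == 'op' or arr[2][0:4] == 'name':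
--         return False
--     return not any(a == '-' and b in _LOWER
--                    for a, b in zip(line, line[1:]))
-- ===== Notes on version B (the rewrite author's own statement) =====
-- stated objective: simpler
-- what changed: The loop running 26 separate substring searches over the line, one per lowercase letter, is replaced by a single pass over adjacent character pairs of the line that looks for a hyphen immediately followed by a lowercase letter; the field guard on arr[2] is kept as is.
import Mathlib
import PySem

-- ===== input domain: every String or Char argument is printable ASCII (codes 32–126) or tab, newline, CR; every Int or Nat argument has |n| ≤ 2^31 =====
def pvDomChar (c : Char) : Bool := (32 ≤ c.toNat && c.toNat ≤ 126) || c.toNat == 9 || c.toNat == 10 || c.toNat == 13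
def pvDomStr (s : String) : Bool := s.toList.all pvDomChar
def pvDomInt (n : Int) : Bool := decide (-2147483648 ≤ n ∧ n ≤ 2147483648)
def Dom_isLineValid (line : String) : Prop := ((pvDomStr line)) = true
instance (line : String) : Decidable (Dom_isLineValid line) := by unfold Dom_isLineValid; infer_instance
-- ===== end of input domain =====

-- B replaces A's 26 repeated substring searches with one pass over adjacent
-- character pairs of the line; simpler, same return value wherever A returns.

-- ===== PORT A =====
-- alphabet = list("abcdefghijklmnopqrstuvwxyz")
def pvAlphabet : List Char := "abcdefghijklmnopqrstuvwxyz".toList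

-- 'for letter in alphabet: if ("-" + letter) in line: return False' / 'return True'
def pvLetterLoop (cs : List Char) : List Char → Bool
  | [] => true
  | l :: rest => if PySem.Chars.isIn ['-', l] cs then false else pvLetterLoop cs rest

def isLineValid (line : String) : Bool :=
  -- arr = line.rstrip().split(' '); arr[2]
  match PySem.List.pyGet? (PySem.Chars.splitOn (PySem.Chars.rstrip line.toList) [' ']) 2 with
  | none => false  -- Python raises IndexError here; excluded by Pre_isLineValid
  | some a2 =>
    if PySem.List.slice a2 (some 0) (some 2) = "op".toList ∨
       PySem.List.slice a2 (some 0) (some 4) = "name".toList then false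
    else pvLetterLoop line.toList pvAlphabet

-- ===== PORT B =====
-- _LOWER = "abcdefghijklmnopqrstuvwxyz"
def pvLower : List Char := "abcdefghijklmnopqrstuvwxyz".toList

def isLineValid_alt (line : String) : Bool :=
  -- arr = line.rstrip().split(' '); arr[2]
  match PySem.List.pyGet? (PySem.Chars.splitOn (PySem.Chars.rstrip line.toList) [' ']) 2 with
  | none => false  -- Python raises IndexError here; excluded by Pre_isLineValid
  | some a2 =>
    if PySem.List.slice a2 (some 0) (some 2) = "op".toList ∨
       PySem.List.slice a2 (some 0) (some 4) = "name".toList then false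
    else
      -- not any(a == '-' and b in _LOWER for a, b in zip(line, line[1:]))
      !((line.toList.zip (PySem.List.slice line.toList (some 1) none)).any
          fun p => p.1 == '-' && PySem.Chars.isIn [p.2] pvLower)

-- ===== PRECONDITION & SPEC =====
-- Pre_ excludes exactly the lines whose rstripped text has fewer than three
-- space-separated fields: there arr[2] raises IndexError in Python.
def Pre_isLineValid (line : String) : Prop :=
  3 ≤ (PySem.Chars.splitOn (PySem.Chars.rstrip line.toList) [' ']).length
instance (line : String) : Decidable (Pre_isLineValid line) := by unfold Pre_isLineValid; infer_instance

def pvWitness_isLineValid : String := "a b c"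

def Spec_isLineValid (line : String) (out : Bool) : Prop := out = isLineValid_alt line
instance (line : String) (out : Bool) : Decidable (Spec_isLineValid line out) := by unfold Spec_isLineValid; infer_instance

-- ===== CLAIM (what is proved, stated in full; the proofs are below) =====
def Claim_equal_isLineValid : Prop := ∀ (line : String), Dom_isLineValid line → Pre_isLineValid line → Spec_isLineValid line (isLineValid line)

-- ===== LEMMAS AND PROOFS =====

theorem pvSingleton_infix_iff {b : Char} {L : List Char} : [b] <:+: L ↔ b ∈ L := by
  constructor
  · intro h; exact h.mem (by simp)
  · intro h; obtain ⟨s, t, rfl⟩ := List.append_of_mem h; exact ⟨s, t, by simp⟩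

theorem pvPair_infix_iff (a b : Char) (cs : List Char) :
    [a, b] <:+: cs ↔ (a, b) ∈ cs.zip cs.tail := by
  induction cs with
  | nil => simp
  | cons c cs' ih =>
    cases cs' with
    | nil =>
      simp only [List.tail_cons, List.zip_nil_right, List.not_mem_nil, iff_false]
      intro h
      have := h.length_le; simp at this
    | cons d rest =>
      rw [List.infix_cons_iff, List.cons_prefix_cons, List.cons_prefix_cons, ih]
      simp [Prod.ext_iff]

theorem pvLetterLoop_eq (cs : List Char) (L : List Char) :
    pvLetterLoop cs L = !(L.any fun l => PySem.Chars.isIn ['-', l] cs) := by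
  induction L with
  | nil => simp [pvLetterLoop]
  | cons l rest ih =>
    simp only [pvLetterLoop, List.any_cons, ih]
    by_cases h : PySem.Chars.isIn ['-', l] cs = true <;> simp [h]

theorem pvAny_eq (cs L : List Char) :
    (L.any fun l => PySem.Chars.isIn ['-', l] cs)
      = ((cs.zip cs.tail).any fun p => p.1 == '-' && PySem.Chars.isIn [p.2] L) := by
  rw [Bool.eq_iff_iff, List.any_eq_true, List.any_eq_true]
  constructor
  · rintro ⟨l, hl, hc⟩
    rw [PySem.Chars.isIn_iff_infix, pvPair_infix_iff] at hc
    refine ⟨('-', l), hc, ?_⟩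
    simp [PySem.Chars.isIn_iff_infix, pvSingleton_infix_iff, hl]
  · rintro ⟨⟨a, b⟩, hmem, hp⟩
    simp only [Bool.and_eq_true, beq_iff_eq] at hp
    obtain ⟨rfl, hb⟩ := hp
    rw [PySem.Chars.isIn_iff_infix, pvSingleton_infix_iff] at hb
    exact ⟨b, hb, by rw [PySem.Chars.isIn_iff_infix, pvPair_infix_iff]; exact hmem⟩

-- ===== VERDICT (by name: the statement is the Claim_ definition above) =====
theorem isLineValid_spec : Claim_equal_isLineValid := by
  intro line _ hpre
  unfold Pre_isLineValid at hpre
  unfold Spec_isLineValid isLineValid isLineValid_alt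
  cases h : PySem.List.pyGet? (PySem.Chars.splitOn (PySem.Chars.rstrip line.toList) [' ']) 2 with
  | none =>
    exfalso
    simp [PySem.List.pyGet?, PySem.List.pyIdx?] at h
    omega
  | some a2 =>
    simp only
    split_ifs with h
    · rfl
    · rw [PySem.List.slice_from line.toList (by norm_num : (0:Int) ≤ 1)]
      have htail : List.drop (1:Int).toNat line.toList = line.toList.tail := by
        simp
      rw [htail, pvLetterLoop_eq, pvAny_eq line.toList pvAlphabet]
      rfl
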